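-- pv_equiv track=rewrite | github.com/DamonGeelen/Connect-Four-AI | my_ai.py | up_streak_check
-- ===== SOURCE A (Python) =====
-- def up_streak_check(board, symbol):
--     # Keep track of streak
--     up_streak = 0
--
--     # Keep track of checked spaces
--     checked = []
--
--     # Check for streaks moving upward
--     for col in range(len(board)):
--         for row in range(len(board[0]) - 1, 2, -1):
--
--             # Skip checked spaces
--             if [col, row] in checked:
--                 continue
--
--             else:
--                 if board[col][row] == symbol:
--                     i = 1
--                     while row - i >= 0 and board[col][row - i] == symbol:
--                         checked.append([col, row - i])
--                         i += 1
--
--                     # Only count streak if it is not blocked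
--                     if row - i >= 0 and board[col][row - i] == ' ':
--                         up_streak += i - 1
--
--     return up_streak
-- ===== SOURCE B (Python) =====
-- def up_streak_check(board, symbol):
--     # Single bottom-up scan per column tracking the current run; no 'checked' list.
--     if not board:
--         return 0
--     rows = len(board[0])
--     if rows < 4:
--         return 0
--     total = 0
--     for column in board:
--         b = None  # bottom index of the current run of `symbol`, or None
--         for r in range(rows - 1, -1, -1):
--             if column[r] == symbol:
--                 if b is None:
--                     b = r
--             else:
--                 if b is not None and b >= 3 and column[r] == ' ':
--                     total += b - r - 1
--                 b = None
--     return total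
-- ===== Notes on version B (the rewrite author's own statement) =====
-- stated objective: simpler
-- what changed: A's bookkeeping (a global `checked` list scanned by membership on every cell, plus an inner while-loop that re-walks each run) is replaced by one plain bottom-up scan per column that tracks the current run's bottom index and adds its unblocked length-minus-one when the run ends.
import Mathlib
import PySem

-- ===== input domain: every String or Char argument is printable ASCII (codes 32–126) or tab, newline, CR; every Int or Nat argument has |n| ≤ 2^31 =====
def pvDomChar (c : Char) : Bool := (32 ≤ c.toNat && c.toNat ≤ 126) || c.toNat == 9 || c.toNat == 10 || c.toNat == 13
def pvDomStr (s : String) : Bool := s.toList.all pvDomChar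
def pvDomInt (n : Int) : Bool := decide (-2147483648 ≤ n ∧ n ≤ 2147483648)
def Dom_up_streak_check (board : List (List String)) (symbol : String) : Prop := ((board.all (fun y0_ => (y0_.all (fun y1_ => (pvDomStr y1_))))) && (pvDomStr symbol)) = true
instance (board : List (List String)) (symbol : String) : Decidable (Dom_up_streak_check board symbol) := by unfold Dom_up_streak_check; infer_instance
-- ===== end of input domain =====

-- B replaces A's `checked`-list bookkeeping (with its membership scans and inner while-skip)
-- by a single bottom-up run-tracking pass per column; return values agree on all of Pre_.

-- ===== PORT A =====
-- the `while row - i >= 0 and board[col][row-i] == symbol` loop; appends to `checked`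
def pvAWhile (colL : List String) (symbol : String) (col row : Int) (i : Int)
    (checked : List (Int × Int)) : Int × List (Int × Int) :=
  if h : 0 ≤ row - i ∧ PySem.List.pyGet? colL (row - i) = some symbol then
    pvAWhile colL symbol col row (i + 1) (checked ++ [(col, row - i)])
  else (i, checked)
termination_by (row - i + 1).toNat
decreasing_by omega

-- the `for row in range(len(board[0]) - 1, 2, -1)` loop, state = (up_streak, checked)
def pvAInner (colL : List String) (symbol : String) (col : Int) (r : Int)
    (st : Int × List (Int × Int)) : Int × List (Int × Int) :=
  if h3 : 3 ≤ r then
    let st' :=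
      if (col, r) ∈ st.2 then st
      else if PySem.List.pyGet? colL r = some symbol then
        let w := pvAWhile colL symbol col r 1 st.2
        (st.1 + (if 0 ≤ r - w.1 ∧ PySem.List.pyGet? colL (r - w.1) = some " " then w.1 - 1 else 0),
         w.2)
      else st
    pvAInner colL symbol col (r - 1) st'
  else st
termination_by (r - 2).toNat
decreasing_by omega

-- the `for col in range(len(board))` loop (index counter + current column)
def pvAOuter (symbol : String) (rtop : Int) (cols : List (List String)) (col : Int)
    (st : Int × List (Int × Int)) : Int × List (Int × Int) :=
  match cols with
  | [] => st
  | c :: rest => pvAOuter symbol rtop rest (col + 1) (pvAInner c symbol col rtop st)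

def up_streak_check (board : List (List String)) (symbol : String) : Int :=
  (pvAOuter symbol (((board.headD []).length : Int) - 1) board 0 (0, [])).1

-- ===== PORT B =====
-- B's inner row loop: scan r = rows-1 .. 0, b = bottom of the current run (or none)
def pvBCol (colL : List String) (symbol : String) (r : Int) (b : Option Int) (total : Int) : Int :=
  if h : 0 ≤ r then
    if PySem.List.pyGet? colL r = some symbol then
      pvBCol colL symbol (r - 1) (match b with | none => some r | some bv => some bv) total
    else
      match b with
      | some bv =>
          pvBCol colL symbol (r - 1) none
            (if 3 ≤ bv ∧ PySem.List.pyGet? colL r = some " " then total + (bv - r - 1) else total)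
      | none => pvBCol colL symbol (r - 1) none total
  else total
termination_by (r + 1).toNat
decreasing_by all_goals omega

def pvBOuter (symbol : String) (rtop : Int) (cols : List (List String)) (total : Int) : Int :=
  match cols with
  | [] => total
  | c :: rest => pvBOuter symbol rtop rest (pvBCol c symbol rtop none total)

def up_streak_check_alt (board : List (List String)) (symbol : String) : Int :=
  match board with
  | [] => 0
  | c0 :: _ =>
    let rows : Int := c0.length
    if rows < 4 then 0 else pvBOuter symbol (rows - 1) board 0

-- ===== PRECONDITION & SPEC =====
-- Pre_ excludes exactly the boards on which Python A raises IndexError: some column is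
-- shorter than board[0] while rows len(board[0])-1 .. 3 are actually scanned.
def Pre_up_streak_check (board : List (List String)) (symbol : String) : Prop :=
  board = [] ∨ (board.headD []).length ≤ 3 ∨ ∀ c ∈ board, (board.headD []).length ≤ c.length

instance (board : List (List String)) (symbol : String) :
    Decidable (Pre_up_streak_check board symbol) := by unfold Pre_up_streak_check; infer_instance

def pvWitness_up_streak_check : List (List String) × String :=
  ([["X", "X", "X", "X", " "], ["O", "X", " ", " ", " "]], "X")

def Spec_up_streak_check (board : List (List String)) (symbol : String) (out : Int) : Prop :=
  out = up_streak_check_alt board symbol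
instance (board : List (List String)) (symbol : String) (out : Int) :
    Decidable (Spec_up_streak_check board symbol out) := by unfold Spec_up_streak_check; infer_instance

-- ===== CLAIM (what is proved, stated in full; the proofs are below) =====
def Claim_equal_up_streak_check : Prop := ∀ (board : List (List String)) (symbol : String), Dom_up_streak_check board symbol → Pre_up_streak_check board symbol → Spec_up_streak_check board symbol (up_streak_check board symbol)

-- ===== LEMMAS AND PROOFS =====

def pvTop (colL : List String) (symbol : String) (r : Int) : Int :=
  if h : 0 ≤ r - 1 ∧ PySem.List.pyGet? colL (r - 1) = some symbol then pvTop colL symbol (r - 1)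
  else r
termination_by (r + 1).toNat
decreasing_by omega

lemma pvTop_le (colL : List String) (symbol : String) (r : Int) : pvTop colL symbol r ≤ r := by
  fun_induction pvTop with
  | case1 r h ih => omega
  | case2 r h => omega

lemma pvTop_run (colL : List String) (symbol : String) (r : Int) :
    ∀ j, pvTop colL symbol r ≤ j → j ≤ r - 1 →
      0 ≤ j ∧ PySem.List.pyGet? colL j = some symbol := by
  fun_induction pvTop with
  | case1 r h ih =>
      intro j h1 h2
      rcases lt_or_ge j (r-1) with hlt | hge
      · exact ih j h1 (by omega)
      · have : j = r - 1 := by omega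
        subst this; exact h
  | case2 r h => intro j h1 h2; omega

lemma pvTop_stop (colL : List String) (symbol : String) (r : Int) :
    ¬ (0 ≤ pvTop colL symbol r - 1 ∧
       PySem.List.pyGet? colL (pvTop colL symbol r - 1) = some symbol) := by
  fun_induction pvTop with
  | case1 r h ih => exact ih
  | case2 r h => exact h

lemma pvTop_step (colL : List String) (symbol : String) (r : Int)
    (h : 0 ≤ r - 1 ∧ PySem.List.pyGet? colL (r - 1) = some symbol) :
    pvTop colL symbol r = pvTop colL symbol (r - 1) := by
  rw [pvTop, dif_pos h]

lemma pvTop_end (colL : List String) (symbol : String) (r : Int)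
    (h : ¬ (0 ≤ r - 1 ∧ PySem.List.pyGet? colL (r - 1) = some symbol)) :
    pvTop colL symbol r = r := by
  rw [pvTop, dif_neg h]

lemma pvAWhile_fst (colL : List String) (symbol : String) (col row i : Int)
    (checked : List (Int × Int)) :
    (pvAWhile colL symbol col row i checked).1 = row - pvTop colL symbol (row - i + 1) + 1 := by
  fun_induction pvAWhile with
  | case1 i checked h ih =>
      have e : pvTop colL symbol (row - i + 1) = pvTop colL symbol (row - i) := by
        have := pvTop_step colL symbol (row - i + 1) (by simpa using h)
        simpa using this
      have e2 : row - (i + 1) + 1 = row - i := by ring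
      rw [ih, e2, e]
  | case2 i checked h =>
      have e : pvTop colL symbol (row - i + 1) = row - i + 1 := by
        apply pvTop_end; simpa using h
      rw [e]; omega

lemma pvAWhile_mem (colL : List String) (symbol : String) (col row i : Int)
    (checked : List (Int × Int)) (p : Int × Int) :
    p ∈ (pvAWhile colL symbol col row i checked).2 ↔
      p ∈ checked ∨ (p.1 = col ∧ pvTop colL symbol (row - i + 1) ≤ p.2 ∧ p.2 ≤ row - i) := by
  fun_induction pvAWhile with
  | case1 i checked h ih =>
      have e : pvTop colL symbol (row - i + 1) = pvTop colL symbol (row - i) := by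
        have := pvTop_step colL symbol (row - i + 1) (by simpa using h)
        simpa using this
      have e2 : row - (i + 1) + 1 = row - i := by ring
      rw [ih, e2, e, List.mem_append]
      have hle := pvTop_le colL symbol (row - i)
      constructor
      · rintro (⟨hc | hc⟩ | ⟨h1, h2, h3⟩)
        · exact Or.inl hc
        · simp only [List.mem_singleton] at hc
          subst hc; exact Or.inr ⟨rfl, by omega⟩
        · exact Or.inr ⟨h1, by omega⟩
      · rintro (hc | ⟨h1, h2, h3⟩)
        · exact Or.inl (Or.inl hc)
        · rcases lt_or_ge p.2 (row - i) with hlt | hge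
          · exact Or.inr ⟨h1, h2, by omega⟩
          · have : p.2 = row - i := by omega
            left; right
            simp only [List.mem_singleton]
            cases p; simp_all
  | case2 i checked h =>
      have e : pvTop colL symbol (row - i + 1) = row - i + 1 := by
        apply pvTop_end; simpa using h
      rw [e]
      constructor
      · intro hc; exact Or.inl hc
      · rintro (hc | ⟨h1, h2, h3⟩)
        · exact hc
        · omega
-- continuing frag: pvAInner, pvH etc.

def pvH (colL : List String) (symbol : String) (rmax : Int) (r : Int) : Int :=
  if h3 : 3 ≤ r then
    (if PySem.List.pyGet? colL r = some symbol then
      (if r + 1 ≤ rmax ∧ PySem.List.pyGet? colL (r + 1) = some symbol then 0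
       else
        (if 0 ≤ pvTop colL symbol r - 1 ∧
             PySem.List.pyGet? colL (pvTop colL symbol r - 1) = some " " then
           r - pvTop colL symbol r
         else 0))
     else 0) + pvH colL symbol rmax (r - 1)
  else 0
termination_by (r - 2).toNat
decreasing_by omega

lemma pvTop_nonneg (colL : List String) (symbol : String) (r : Int) (h0 : 0 ≤ r) :
    0 ≤ pvTop colL symbol r := by
  fun_induction pvTop with
  | case1 r h ih => exact ih (by omega)
  | case2 r h => exact h0

lemma pvAInner_mem (colL : List String) (symbol : String) (col : Int) :
    ∀ (r : Int) (st : Int × List (Int × Int)) (p : Int × Int),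
    p ∈ (pvAInner colL symbol col r st).2 → p ∈ st.2 ∨ p.1 = col := by
  intro r st p
  fun_induction pvAInner with
  | case1 r st h3 st' ih =>
      intro hp
      rcases ih hp with hp' | hc
      · simp only [st'] at hp'
        by_cases hm : (col, r) ∈ st.2
        · rw [dif_pos hm] at hp'; exact Or.inl hp'
        · rw [dif_neg hm] at hp'
          by_cases hs : PySem.List.pyGet? colL r = some symbol
          · rw [dif_pos hs] at hp'
            rcases (pvAWhile_mem colL symbol col r 1 st.2 p).1 hp' with h1 | h2
            · exact Or.inl h1
            · exact Or.inr h2.1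
          · rw [dif_neg hs] at hp'; exact Or.inl hp'
      · exact Or.inr hc
  | case2 r st h3 => intro hp; exact Or.inl hp

lemma pvH_lt (colL : List String) (symbol : String) (rmax r : Int) (h : r < 3) :
    pvH colL symbol rmax r = 0 := by
  rw [pvH, dif_neg (by omega)]

lemma pvH_chain (colL : List String) (symbol : String) (rmax r : Int)
    (hsym : PySem.List.pyGet? colL r = some symbol) (h0 : 0 ≤ r) (hr : r ≤ rmax) :
    ∀ j, pvTop colL symbol r - 1 ≤ j → j ≤ r - 1 →
      pvH colL symbol rmax j = pvH colL symbol rmax (pvTop colL symbol r - 2) := by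
  have main : ∀ n : ℕ, ∀ j : Int, (j + 2).toNat = n → pvTop colL symbol r - 1 ≤ j → j ≤ r - 1 →
      pvH colL symbol rmax j = pvH colL symbol rmax (pvTop colL symbol r - 2) := by
    intro n
    induction n using Nat.strong_induction_on with
    | _ n ih =>
      intro j hn h1 h2
      rcases eq_or_lt_of_le h1 with heq | hlt
      · -- j = pvTop r - 1
        subst heq
        by_cases h3 : 3 ≤ pvTop colL symbol r - 1
        · rw [pvH, dif_pos h3]
          have hstop := pvTop_stop colL symbol r
          have : ¬ PySem.List.pyGet? colL (pvTop colL symbol r - 1) = some symbol := by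
            intro hc; exact hstop ⟨by omega, hc⟩
          rw [if_neg this,
            show pvTop colL symbol r - 1 - 1 = pvTop colL symbol r - 2 by ring]
          omega
        · rw [pvH_lt _ _ _ _ (by omega), pvH_lt _ _ _ _ (by omega)]
      · -- pvTop r ≤ j ≤ r - 1
        by_cases h3 : 3 ≤ j
        · have hsj : PySem.List.pyGet? colL j = some symbol :=
            (pvTop_run colL symbol r j (by omega) h2).2
          have hsj1 : PySem.List.pyGet? colL (j + 1) = some symbol := by
            rcases eq_or_lt_of_le (show j + 1 ≤ r by omega) with he | hl
            · rw [he]; exact hsym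
            · exact (pvTop_run colL symbol r (j + 1) (by omega) (by omega)).2
          rw [pvH, dif_pos h3, if_pos hsj, if_pos ⟨by omega, hsj1⟩]
          have := ih (j + 1).toNat (by omega) (j - 1) (by omega) (by omega) (by omega)
          rw [this]; omega
        · rw [pvH_lt _ _ _ _ (by omega)]
          have ha := pvTop_nonneg colL symbol r h0
          rw [pvH_lt _ _ _ _ (by omega)]
  intro j; exact main (j + 2).toNat j rfl

lemma pvAInner_eq (colL : List String) (symbol : String) (col rmax : Int) :
    ∀ r, r ≤ rmax → ∀ acc chk,
      (∀ j, 3 ≤ j → j ≤ r →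
        ((col, j) ∈ chk ↔ (r + 1 ≤ rmax ∧
          ∀ k, j ≤ k → k ≤ r + 1 → PySem.List.pyGet? colL k = some symbol))) →
      (pvAInner colL symbol col r (acc, chk)).1 = acc + pvH colL symbol rmax r := by
  have main : ∀ n : ℕ, ∀ r : Int, (r - 2).toNat = n → r ≤ rmax → ∀ acc chk,
      (∀ j, 3 ≤ j → j ≤ r →
        ((col, j) ∈ chk ↔ (r + 1 ≤ rmax ∧
          ∀ k, j ≤ k → k ≤ r + 1 → PySem.List.pyGet? colL k = some symbol))) →
      (pvAInner colL symbol col r (acc, chk)).1 = acc + pvH colL symbol rmax r := by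
    intro n
    induction n using Nat.strong_induction_on with
    | _ n ih =>
      intro r hn hr acc chk hInv
      by_cases h3 : 3 ≤ r
      · rw [pvAInner, dif_pos h3]
        by_cases hm : (col, r) ∈ chk
        · -- skipped: r is mid-run
          simp only [hm, if_true]
          obtain ⟨hrm, hall⟩ := (hInv r h3 le_rfl).1 hm
          have hsr : PySem.List.pyGet? colL r = some symbol := hall r le_rfl (by omega)
          have hsr1 : PySem.List.pyGet? colL (r + 1) = some symbol := hall (r + 1) (by omega) le_rfl
          have hInv' : ∀ j, 3 ≤ j → j ≤ r - 1 →
              ((col, j) ∈ chk ↔ ((r - 1) + 1 ≤ rmax ∧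
                ∀ k, j ≤ k → k ≤ (r - 1) + 1 → PySem.List.pyGet? colL k = some symbol)) := by
            intro j hj3 hjr
            rw [hInv j hj3 (by omega)]
            constructor
            · rintro ⟨_, hk⟩
              exact ⟨by omega, fun k hk1 hk2 => hk k hk1 (by omega)⟩
            · rintro ⟨_, hk⟩
              refine ⟨hrm, fun k hk1 hk2 => ?_⟩
              rcases lt_or_ge k r with hlt | hge
              · exact hk k hk1 (by omega)
              · rcases eq_or_lt_of_le hge with he | hl
                · rw [← he]; exact hsr
                · have : k = r + 1 := by omega
                  rw [this]; exact hsr1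
          have hH : pvH colL symbol rmax r = 0 + pvH colL symbol rmax (r - 1) := by
            rw [pvH, dif_pos h3, if_pos hsr, if_pos ⟨hrm, hsr1⟩]
          rw [ih (r - 1 - 2).toNat (by omega) (r - 1) rfl (by omega) acc chk hInv', hH]
          omega
      -- trigger or non-symbol
        · simp only [hm, if_false]
          by_cases hs : PySem.List.pyGet? colL r = some symbol
          · -- trigger
            simp only [hs, if_true]
            have hnmid : ¬ (r + 1 ≤ rmax ∧ PySem.List.pyGet? colL (r + 1) = some symbol) := by
              rintro ⟨hle, hs1⟩
              apply hm
              refine (hInv r h3 le_rfl).2 ⟨hle, fun k hk1 hk2 => ?_⟩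
              rcases eq_or_lt_of_le hk2 with he | hl
              · rw [he]; exact hs1
              · have : k = r := by omega
                rw [this]; exact hs
            have hw1 : (pvAWhile colL symbol col r 1 chk).1 = r - pvTop colL symbol r + 1 := by
              have := pvAWhile_fst colL symbol col r 1 chk
              simpa using this
            set a := pvTop colL symbol r with ha
            have haler : a ≤ r := pvTop_le colL symbol r
            have hInv' : ∀ j, 3 ≤ j → j ≤ r - 1 →
                ((col, j) ∈ (pvAWhile colL symbol col r 1 chk).2 ↔ ((r - 1) + 1 ≤ rmax ∧
                  ∀ k, j ≤ k → k ≤ (r - 1) + 1 → PySem.List.pyGet? colL k = some symbol)) := by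
              intro j hj3 hjr
              have hmem := pvAWhile_mem colL symbol col r 1 chk (col, j)
              simp only [show r - 1 + 1 = r by ring] at hmem ⊢
              rw [hmem]
              constructor
              · rintro (hc | ⟨-, hj1, hj2⟩)
                · obtain ⟨hle, hall⟩ := (hInv j hj3 (by omega)).1 hc
                  exact absurd ⟨hle, hall (r + 1) (by omega) le_rfl⟩ hnmid
                · refine ⟨by omega, fun k hk1 hk2 => ?_⟩
                  rcases eq_or_lt_of_le hk2 with he | hl
                  · rw [he]; exact hs
                  · exact (pvTop_run colL symbol r k (by omega) (by omega)).2
              · rintro ⟨hle, hall⟩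
                right
                refine ⟨by simp, ?_, by omega⟩
                by_contra hja
                have h1 : 0 ≤ a - 1 := by omega
                have h2 : PySem.List.pyGet? colL (a - 1) = some symbol :=
                  hall (a - 1) (by omega) (by omega)
                exact pvTop_stop colL symbol r ⟨h1, h2⟩
            have hH : pvH colL symbol rmax r =
                (if 0 ≤ a - 1 ∧ PySem.List.pyGet? colL (a - 1) = some " " then r - a else 0) +
                  pvH colL symbol rmax (r - 1) := by
              rw [pvH, dif_pos h3, if_pos hs, if_neg hnmid]
            rw [ih (r - 1 - 2).toNat (by omega) (r - 1) rfl (by omega) _ _ hInv', hH, hw1]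
            rw [show r - (r - a + 1) = a - 1 by ring, show r - a + 1 - 1 = r - a by ring]
            omega
          · -- cell r is not the symbol
            simp only [hs, if_false]
            have hInv' : ∀ j, 3 ≤ j → j ≤ r - 1 →
                ((col, j) ∈ chk ↔ ((r - 1) + 1 ≤ rmax ∧
                  ∀ k, j ≤ k → k ≤ (r - 1) + 1 → PySem.List.pyGet? colL k = some symbol)) := by
              intro j hj3 hjr
              constructor
              · intro hc
                obtain ⟨hle, hall⟩ := (hInv j hj3 (by omega)).1 hc
                exact absurd (hall r (by omega) (by omega)) hs
              · rintro ⟨hle, hall⟩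
                exact absurd (hall r (by omega) (by omega)) hs
            have hH : pvH colL symbol rmax r = 0 + pvH colL symbol rmax (r - 1) := by
              rw [pvH, dif_pos h3, if_neg hs]
            rw [ih (r - 1 - 2).toNat (by omega) (r - 1) rfl (by omega) acc chk hInv', hH]
            omega
      · rw [pvAInner, dif_neg h3, pvH_lt _ _ _ _ (by omega)]
        simp
  intro r; exact main (r - 2).toNat r rfl

lemma pvBCol_eq (colL : List String) (symbol : String) (rmax : Int) :
    ∀ r, r ≤ rmax → ∀ total,
      ((r = rmax ∨ ¬ PySem.List.pyGet? colL (r + 1) = some symbol) →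
        pvBCol colL symbol r none total = total + pvH colL symbol rmax r) ∧
      (∀ bv, pvBCol colL symbol r (some bv) total = total +
        (if 3 ≤ bv ∧ 0 ≤ pvTop colL symbol (r + 1) - 1 ∧
            PySem.List.pyGet? colL (pvTop colL symbol (r + 1) - 1) = some " " then
           bv - pvTop colL symbol (r + 1)
         else 0) + pvH colL symbol rmax (pvTop colL symbol (r + 1) - 2)) := by
  have main : ∀ n : ℕ, ∀ r : Int, (r + 1).toNat = n → r ≤ rmax → ∀ total,
      ((r = rmax ∨ ¬ PySem.List.pyGet? colL (r + 1) = some symbol) →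
        pvBCol colL symbol r none total = total + pvH colL symbol rmax r) ∧
      (∀ bv, pvBCol colL symbol r (some bv) total = total +
        (if 3 ≤ bv ∧ 0 ≤ pvTop colL symbol (r + 1) - 1 ∧
            PySem.List.pyGet? colL (pvTop colL symbol (r + 1) - 1) = some " " then
           bv - pvTop colL symbol (r + 1)
         else 0) + pvH colL symbol rmax (pvTop colL symbol (r + 1) - 2)) := by
    intro n
    induction n using Nat.strong_induction_on with
    | _ n ih =>
      intro r hn hr total
      by_cases h0 : 0 ≤ r
      · by_cases hs : PySem.List.pyGet? colL r = some symbol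
        · -- the cell at r is the symbol: the run continues
          have e : pvTop colL symbol (r + 1) = pvTop colL symbol r := by
            have h' : 0 ≤ r + 1 - 1 ∧ PySem.List.pyGet? colL (r + 1 - 1) = some symbol := by
              refine ⟨by omega, ?_⟩
              simpa using hs
            have := pvTop_step colL symbol (r + 1) h'
            simpa using this
          constructor
          · intro hside
            have hrecb := (ih (r - 1 + 1).toNat (by omega) (r - 1) rfl (by omega) total).2 r
            simp only [show r - 1 + 1 = r by ring] at hrecb
            rw [pvBCol, dif_pos h0, if_pos hs]
            refine hrecb.trans ?_
            set a := pvTop colL symbol r with ha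
            have hale : a ≤ r := pvTop_le colL symbol r
            by_cases h3 : 3 ≤ r
            · have hmid : ¬ (r + 1 ≤ rmax ∧ PySem.List.pyGet? colL (r + 1) = some symbol) := by
                rintro ⟨hle, hs1⟩
                rcases hside with he | hn1
                · omega
                · exact hn1 hs1
              have hH : pvH colL symbol rmax r =
                  (if 0 ≤ a - 1 ∧ PySem.List.pyGet? colL (a - 1) = some " " then r - a else 0) +
                    pvH colL symbol rmax (r - 1) := by
                rw [pvH, dif_pos h3, if_pos hs, if_neg hmid]
              have hchain : pvH colL symbol rmax (r - 1) = pvH colL symbol rmax (a - 2) :=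
                pvH_chain colL symbol rmax r hs h0 hr (r - 1) (by omega) (by omega)
              have hcnd : (3 ≤ r ∧ 0 ≤ a - 1 ∧ PySem.List.pyGet? colL (a - 1) = some " ") ↔
                  (0 ≤ a - 1 ∧ PySem.List.pyGet? colL (a - 1) = some " ") := by tauto
              rw [hH, hchain]
              simp only [hcnd]
              ring
            · rw [pvH_lt _ _ _ _ (by omega), if_neg (by intro hc; omega),
                 pvH_lt _ _ _ _ (by omega)]
              ring
          · intro bv
            have hrecb := (ih (r - 1 + 1).toNat (by omega) (r - 1) rfl (by omega) total).2 bv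
            simp only [show r - 1 + 1 = r by ring] at hrecb
            rw [pvBCol, dif_pos h0, if_pos hs]
            refine hrecb.trans ?_
            rw [e]
        · -- the cell at r is not the symbol
          have e : pvTop colL symbol (r + 1) = r + 1 := by
            apply pvTop_end
            rintro ⟨-, hc⟩
            exact hs (by simpa using hc)
          constructor
          · intro _
            have hreca := (ih (r - 1 + 1).toNat (by omega) (r - 1) rfl (by omega) total).1
              (Or.inr (by simpa using hs))
            rw [pvBCol, dif_pos h0, if_neg hs]
            refine hreca.trans ?_
            by_cases h3 : 3 ≤ r
            · have hH : pvH colL symbol rmax r = 0 + pvH colL symbol rmax (r - 1) := by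
                rw [pvH, dif_pos h3, if_neg hs]
              rw [hH]; ring
            · rw [pvH_lt _ _ _ _ (by omega), pvH_lt _ _ _ _ (by omega)]
          · intro bv
            have hreca := (ih (r - 1 + 1).toNat (by omega) (r - 1) rfl (by omega)
              (if 3 ≤ bv ∧ PySem.List.pyGet? colL r = some " " then total + (bv - r - 1)
               else total)).1 (Or.inr (by simpa using hs))
            rw [pvBCol, dif_pos h0, if_neg hs]
            refine hreca.trans ?_
            rw [e]
            simp only [show r + 1 - 1 = r by ring, show r + 1 - 2 = r - 1 by ring]
            have hcnd : (3 ≤ bv ∧ 0 ≤ r ∧ PySem.List.pyGet? colL r = some " ") ↔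
                (3 ≤ bv ∧ PySem.List.pyGet? colL r = some " ") := by tauto
            simp only [hcnd]
            split_ifs <;> ring
      · -- r < 0: B's row loop is over
        have e : pvTop colL symbol (r + 1) = r + 1 := by
          apply pvTop_end
          rintro ⟨hc, -⟩
          omega
        constructor
        · intro _
          rw [pvBCol, dif_neg h0, pvH_lt _ _ _ _ (by omega)]
          ring
        · intro bv
          rw [pvBCol, dif_neg h0, e]
          rw [if_neg (by rintro ⟨-, hc, -⟩; omega), pvH_lt _ _ _ _ (by omega)]
          ring
  intro r; exact main (r + 1).toNat r rfl

lemma pvAOuter_eq (symbol : String) (rtop : Int) :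
    ∀ (cols : List (List String)) (col : Int) (st : Int × List (Int × Int)),
      (∀ p ∈ st.2, p.1 < col) →
      (pvAOuter symbol rtop cols col st).1 =
        st.1 + (cols.map (fun c => pvH c symbol rtop rtop)).sum := by
  intro cols
  induction cols with
  | nil => intro col st _; simp [pvAOuter]
  | cons c rest ih =>
      rintro col ⟨acc, chk⟩ h
      have hInv : ∀ j, 3 ≤ j → j ≤ rtop →
          ((col, j) ∈ chk ↔ (rtop + 1 ≤ rtop ∧
            ∀ k, j ≤ k → k ≤ rtop + 1 → PySem.List.pyGet? c k = some symbol)) := by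
        intro j _ _
        constructor
        · intro hc
          have := h (col, j) hc
          simp at this
        · rintro ⟨hle, -⟩; omega
      have hfst := pvAInner_eq c symbol col rtop rtop le_rfl acc chk hInv
      have hmem : ∀ p ∈ (pvAInner c symbol col rtop (acc, chk)).2, p.1 < col + 1 := by
        intro p hp
        rcases pvAInner_mem c symbol col rtop (acc, chk) p hp with h1 | h2
        · have := h p h1; omega
        · omega
      show (pvAOuter symbol rtop rest (col + 1) (pvAInner c symbol col rtop (acc, chk))).1 = _
      rw [ih (col + 1) _ hmem, hfst]
      simp [List.sum_cons]
      ring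

lemma pvBOuter_eq (symbol : String) (rtop : Int) :
    ∀ (cols : List (List String)) (total : Int),
      pvBOuter symbol rtop cols total =
        total + (cols.map (fun c => pvH c symbol rtop rtop)).sum := by
  intro cols
  induction cols with
  | nil => intro total; simp [pvBOuter]
  | cons c rest ih =>
      intro total
      show pvBOuter symbol rtop rest (pvBCol c symbol rtop none total) = _
      rw [ih, (pvBCol_eq c symbol rtop rtop le_rfl total).1 (Or.inl rfl)]
      simp [List.sum_cons]
      ring

-- ===== VERDICT (by name: the statement is the Claim_ definition above) =====
theorem up_streak_check_spec : Claim_equal_up_streak_check := by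
  unfold Claim_equal_up_streak_check
  intro board symbol _hdom _hpre
  unfold Spec_up_streak_check
  cases board with
  | nil => rfl
  | cons c0 rest =>
      have hA : up_streak_check (c0 :: rest) symbol =
          ((c0 :: rest).map
            (fun c => pvH c symbol ((c0.length : Int) - 1) ((c0.length : Int) - 1))).sum := by
        unfold up_streak_check
        rw [pvAOuter_eq symbol _ (c0 :: rest) 0 (0, []) (by intro p hp; simp at hp)]
        simp
      by_cases h4 : (c0.length : Int) < 4
      · rw [hA]
        have hz : ∀ c ∈ c0 :: rest,
            pvH c symbol ((c0.length : Int) - 1) ((c0.length : Int) - 1) = 0 :=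
          fun c _ => pvH_lt _ _ _ _ (by omega)
        rw [List.map_congr_left hz]
        simp [up_streak_check_alt, h4]
      · rw [hA]
        simp only [up_streak_check_alt]
        rw [if_neg h4, pvBOuter_eq symbol ((c0.length : Int) - 1) (c0 :: rest) 0]
        ring
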